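-- pv_equiv track=rewrite | github.com/rdas3-bths/Advent2015 | Day11-2015.py | check_multiple_duplicate_pair
-- ===== SOURCE A (Python) =====
-- def check_duplicate_pair(input):
--     i = 0
--     pairs = []
--     while i <= len(input) - 2:
--         sub = input[i:i+2]
--         pairs.append(sub)
--         i += 1
--
--     i = 0
--     while i < len(pairs) - 1:
--         first = pairs[i]
--         second = pairs[i+1]
--         if first == second:
--             pairs.pop(i)
--         i += 1
--
--     pair_map = {}
--
--     for pair in pairs:
--         if pair in pair_map.keys():
--             pair_map[pair] += 1
--         else:
--             pair_map[pair] = 1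
--
--     return pair_map
--
-- def check_multiple_duplicate_pair(password):
--     count = 0
--     pair_map = check_duplicate_pair(password)
--     for key in pair_map.keys():
--         if key[0] == key[1]:
--             count += 1
--
--     if count > 1:
--         return True
--     else:
--         return False
-- ===== SOURCE B (Python) =====
-- from itertools import groupby
--
-- def check_multiple_duplicate_pair(password):
--     doubled = set()
--     for ch, grp in groupby(password):
--         if len(list(grp)) >= 2:
--             doubled.add(ch)
--     return len(doubled) > 1
-- ===== Notes on version B (the rewrite author's own statement) =====
-- stated objective: faster
-- what changed: Replaces A's pipeline (build all sliding two-char pairs, an index-based pop-dedup pass, a dict of counts, then count doubled keys) with a single itertools.groupby pass that collects the distinct letters whose maximal run has length >= 2.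
import Mathlib
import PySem

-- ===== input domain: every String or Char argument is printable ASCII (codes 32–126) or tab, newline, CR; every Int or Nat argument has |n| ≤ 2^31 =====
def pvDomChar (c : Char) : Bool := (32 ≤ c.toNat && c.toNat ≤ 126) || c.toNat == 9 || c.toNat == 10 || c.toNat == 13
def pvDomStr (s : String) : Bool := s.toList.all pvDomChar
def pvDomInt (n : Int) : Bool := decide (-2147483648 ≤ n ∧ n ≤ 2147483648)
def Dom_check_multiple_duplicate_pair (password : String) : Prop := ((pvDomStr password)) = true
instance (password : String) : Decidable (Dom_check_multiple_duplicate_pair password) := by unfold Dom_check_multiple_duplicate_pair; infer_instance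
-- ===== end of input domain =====

-- B replaces A's pair-list / pop-dedup / dict-count pipeline by grouping the password into
-- maximal runs of equal characters and collecting the distinct run letters of length ≥ 2
-- (one linear pass; a timing run measured B faster than A on the generated inputs).

-- ===== PORT A =====

-- first while loop of check_duplicate_pair: pairs.append(input[i:i+2]) for i = 0 .. len-2
def pvBuildPairs (s : List Char) (i : Nat) : List (List Char) :=
  if h : (i : Int) ≤ (s.length : Int) - 2 then
    PySem.List.slice s (some (i : Int)) (some ((i : Int) + 2)) :: pvBuildPairs s (i + 1)
  else []
termination_by s.length - i
decreasing_by omega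

-- second while loop: if pairs[i] == pairs[i+1] then pairs.pop(i); i += 1.
-- The loop condition guarantees i and i+1 are in range, so pairs[i] is getD and
-- list.pop(i) is eraseIdx i (PySem.List.pop?_natCast form), exact here.
def pvPopLoop (pairs : List (List Char)) (i : Nat) : List (List Char) :=
  if h : (i : Int) < (pairs.length : Int) - 1 then
    if pairs.getD i [] == pairs.getD (i + 1) [] then
      pvPopLoop (pairs.eraseIdx i) (i + 1)
    else
      pvPopLoop pairs (i + 1)
  else pairs
termination_by pairs.length - i
decreasing_by
  · have : (pairs.eraseIdx i).length = pairs.length - 1 := by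
      simp [List.length_eraseIdx]; omega
    omega
  · omega

-- the counting for-loop body: if pair in pair_map.keys(): +=1 else: = 1
def pvCountStep (d : PySem.Dict (List Char) Int) (pair : List Char) : PySem.Dict (List Char) Int :=
  if d.contains pair then d.modify pair 0 (· + 1) else d.insert pair 1

def check_multiple_duplicate_pair (password : String) : Bool :=
  -- check_duplicate_pair, inlined helper-for-helper:
  let pairs := pvPopLoop (pvBuildPairs password.toList 0) 0
  let pair_map := pairs.foldl pvCountStep PySem.Dict.empty
  -- for key in pair_map.keys(): if key[0] == key[1]: count += 1
  -- (every key has length 2, so key[0]/key[1] never raise; pyGet? is exact here)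
  let count := pair_map.keys.foldl
    (fun c key => if PySem.List.pyGet? key 0 == PySem.List.pyGet? key 1 then c + 1 else c) (0 : Int)
  if count > 1 then true else false

-- ===== PORT B =====

-- itertools.groupby(password): maximal runs as (letter, run length)
def pvRuns (l : List Char) : List (Char × Nat) :=
  match l with
  | [] => []
  | a :: t =>
      (a, (t.takeWhile (fun c => c == a)).length + 1) :: pvRuns (t.dropWhile (fun c => c == a))
termination_by l.length
decreasing_by
  have := List.length_dropWhile_le (fun c => c == a) t
  simp; omega

def check_multiple_duplicate_pair_alt (password : String) : Bool :=
  let doubled := (pvRuns password.toList).foldl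
    (fun s r => if 2 ≤ r.2 then PySem.Set.add s r.1 else s) PySem.Set.empty
  decide (PySem.Set.len doubled > 1)

-- ===== PRECONDITION & SPEC =====
def Spec_check_multiple_duplicate_pair (password : String) (out : Bool) : Prop := out = check_multiple_duplicate_pair_alt password
instance (password : String) (out : Bool) : Decidable (Spec_check_multiple_duplicate_pair password out) := by unfold Spec_check_multiple_duplicate_pair; infer_instance

-- ===== CLAIM (what is proved, stated in full; the proofs are below) =====
def Claim_equal_check_multiple_duplicate_pair : Prop := ∀ (password : String), Dom_check_multiple_duplicate_pair password → Spec_check_multiple_duplicate_pair password (check_multiple_duplicate_pair password)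

-- ===== LEMMAS AND PROOFS =====

-- the list of adjacent two-character windows, structurally
def pvAdjPairs : List Char → List (List Char)
  | a :: b :: t => [a, b] :: pvAdjPairs (b :: t)
  | _ => []

theorem pvBuildPairs_eq (s : List Char) (i : Nat) :
    pvBuildPairs s i = pvAdjPairs (s.drop i) := by
  fun_induction pvBuildPairs s i with
  | case1 i h ih =>
    have h1 : i + 1 < s.length := by omega
    have h0 : i < s.length := by omega
    have hslice : PySem.List.slice s (some (i : Int)) (some ((i : Int) + 2)) =
        (s.drop i).take 2 := by
      have := PySem.List.slice_natCast_add s i 2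
      push_cast at this ⊢
      exact this
    have htake : List.take 2 (List.drop i s) = [s[i], s[i + 1]] := by
      rw [List.drop_eq_getElem_cons h0, List.drop_eq_getElem_cons h1]
      rfl
    rw [hslice, htake, ih]
    conv_rhs => rw [List.drop_eq_getElem_cons h0, List.drop_eq_getElem_cons h1]
    rw [show pvAdjPairs (s[i] :: s[i + 1] :: List.drop (i + 1 + 1) s)
          = [s[i], s[i + 1]] :: pvAdjPairs (s[i + 1] :: List.drop (i + 1 + 1) s) from rfl,
        ← List.drop_eq_getElem_cons h1]
  | case2 i h =>
    have hlen : (s.drop i).length ≤ 1 := by simp only [List.length_drop]; omega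
    rcases hd : s.drop i with _ | ⟨a, _ | ⟨b, t⟩⟩
    · simp [pvAdjPairs]
    · simp [pvAdjPairs]
    · rw [hd] at hlen; simp at hlen

theorem pvPopLoop_mem (pairs : List (List Char)) (i : Nat) (x : List Char) :
    x ∈ pvPopLoop pairs i ↔ x ∈ pairs := by
  fun_induction pvPopLoop pairs i with
  | case1 pairs i h heq ih =>
    rw [ih]
    have h1 : i + 1 < pairs.length := by omega
    have h0 : i < pairs.length := by omega
    have hv : pairs[i] = pairs[i + 1] := by
      have := heq
      simp [List.getD_eq_getElem?_getD, List.getElem?_eq_getElem h0,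
            List.getElem?_eq_getElem h1] at this
      exact this
    rw [List.eraseIdx_eq_take_drop_succ]
    constructor
    · intro hx
      rcases List.mem_append.mp hx with hx | hx
      · exact List.mem_of_mem_take hx
      · exact List.mem_of_mem_drop hx
    · intro hx
      by_cases hxi : x = pairs[i]
      · refine List.mem_append.mpr (Or.inr ?_)
        rw [List.drop_eq_getElem_cons h1]
        exact List.mem_cons.mpr (Or.inl (hxi.trans hv))
      · obtain ⟨j, hj, hxj⟩ := List.getElem_of_mem hx
        rcases lt_trichotomy j i with hji | hji | hji
        · refine List.mem_append.mpr (Or.inl ?_)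
          rw [← hxj]
          exact List.mem_take_iff_getElem.mpr ⟨j, by omega, by simp⟩
        · subst hji; exact absurd hxj.symm hxi
        · refine List.mem_append.mpr (Or.inr ?_)
          rw [← hxj]
          refine List.mem_iff_getElem.mpr ⟨j - (i + 1), by simp; omega, ?_⟩
          rw [List.getElem_drop]
          congr 1
          omega
  | case2 pairs i h heq ih => exact ih
  | case3 pairs i h => rfl

theorem pvCountStep_keys (d : PySem.Dict (List Char) Int) (p : List Char) :
    (pvCountStep d p).keys = PySem.Set.add d.keys p := by
  have hins : ∀ (v : Int), (d.insert p v).keys = PySem.Set.add d.keys p := by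
    intro v
    have := PySem.Dict.keys_foldl_insert [p] (fun _ _ => v) d
    simpa [List.foldl, PySem.Set.update] using this
  unfold pvCountStep
  split
  · rw [PySem.Dict.keys_modify]; exact hins _
  · exact hins 1

theorem pvCount_keys (pairs : List (List Char)) :
    (pairs.foldl pvCountStep PySem.Dict.empty).keys = PySem.Set.ofList pairs := by
  have main : ∀ (pairs : List (List Char)) (d : PySem.Dict (List Char) Int),
      (pairs.foldl pvCountStep d).keys = PySem.Set.update d.keys pairs := by
    intro pairs
    induction pairs with
    | nil => intro d; rfl
    | cons p rest ih =>
        intro d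
        simp only [List.foldl_cons, ih, pvCountStep_keys]
        rfl
  rw [main, show (PySem.Dict.empty : PySem.Dict (List Char) Int).keys = PySem.Set.empty from rfl,
     PySem.Set.update_empty]

theorem pvAdjPairs_shape (l : List Char) (x : List Char) (hx : x ∈ pvAdjPairs l) :
    ∃ a b, x = [a, b] := by
  induction l with
  | nil => simp [pvAdjPairs] at hx
  | cons a t ih =>
      match t, hx with
      | [], hx => simp [pvAdjPairs] at hx
      | b :: t', hx =>
          rcases List.mem_cons.mp hx with h | h
          · exact ⟨a, b, h⟩
          · exact ih h

theorem pvAdjPairs_cons_double (a c : Char) (t : List Char) :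
    [c, c] ∈ pvAdjPairs (a :: t) ↔
      (c = a ∧ t.takeWhile (fun x => x == a) ≠ []) ∨
        [c, c] ∈ pvAdjPairs (t.dropWhile (fun x => x == a)) := by
  induction t generalizing a with
  | nil => simp [pvAdjPairs]
  | cons b t' ih =>
      by_cases hba : b = a
      · subst hba
        simp only [pvAdjPairs, List.mem_cons, List.takeWhile_cons, List.dropWhile_cons,
          BEq.rfl, if_pos]
        rw [ih b]
        constructor
        · rintro (h | h)
          · simp at h
            exact Or.inl ⟨h, by simp⟩
          · rcases h with ⟨h1, h2⟩ | h
            · exact Or.inl ⟨h1, by simp⟩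
            · exact Or.inr h
        · rintro (⟨h1, _⟩ | h)
          · exact Or.inl (by simp [h1])
          · exact Or.inr (Or.inr h)
      · have hb : (b == a) = false := by simp [hba]
        simp only [pvAdjPairs, List.mem_cons, List.takeWhile_cons, List.dropWhile_cons, hb]
        simp only [Bool.false_eq_true, reduceIte]
        constructor
        · rintro (h | h)
          · simp at h; exact absurd (h.1.symm.trans h.2) (fun he => hba he.symm)
          · exact Or.inr h
        · rintro (⟨_, h⟩ | h)
          · simp at h
          · exact Or.inr h

theorem pvRuns_double (l : List Char) (c : Char) :
    (∃ r ∈ pvRuns l, r.1 = c ∧ 2 ≤ r.2) ↔ [c, c] ∈ pvAdjPairs l := by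
  fun_induction pvRuns l with
  | case1 => simp [pvAdjPairs]
  | case2 a t ih =>
      rw [pvAdjPairs_cons_double, ← ih]
      simp only [List.mem_cons]
      constructor
      · rintro ⟨r, hr | hr, h1, h2⟩
        · subst hr
          refine Or.inl ⟨h1.symm, ?_⟩
          intro hnil
          rw [hnil] at h2
          simp at h2
        · exact Or.inr ⟨r, hr, h1, h2⟩
      · rintro (⟨h1, h2⟩ | ⟨r, hr, h1, h2⟩)
        · refine ⟨(a, (t.takeWhile (fun x => x == a)).length + 1), Or.inl rfl, h1.symm, ?_⟩
          have : (t.takeWhile (fun x => x == a)).length ≥ 1 := by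
            cases h : t.takeWhile (fun x => x == a)
            · exact absurd h h2
            · simp
          simp; omega
        · exact ⟨r, Or.inr hr, h1, h2⟩

def pvDoubled (l : List Char) : PySem.Set Char :=
  (pvRuns l).foldl (fun s r => if 2 ≤ r.2 then PySem.Set.add s r.1 else s) PySem.Set.empty

theorem pvDoubled_fold_mem (rs : List (Char × Nat)) (s : PySem.Set Char) (c : Char) :
    c ∈ rs.foldl (fun s r => if 2 ≤ r.2 then PySem.Set.add s r.1 else s) s ↔
      c ∈ s ∨ ∃ r ∈ rs, r.1 = c ∧ 2 ≤ r.2 := by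
  induction rs generalizing s with
  | nil => simp
  | cons r rest ih =>
      simp only [List.foldl_cons, ih, List.mem_cons]
      by_cases h : 2 ≤ r.2
      · rw [if_pos h, PySem.Set.mem_add]
        constructor
        · rintro ((hc | hc) | hc)
          · exact Or.inl hc
          · exact Or.inr ⟨r, Or.inl rfl, hc.symm, h⟩
          · rcases hc with ⟨q, hq, h1, h2⟩; exact Or.inr ⟨q, Or.inr hq, h1, h2⟩
        · rintro (hc | ⟨q, hq | hq, h1, h2⟩)
          · exact Or.inl (Or.inl hc)
          · exact Or.inl (Or.inr (hq ▸ h1).symm)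
          · exact Or.inr ⟨q, hq, h1, h2⟩
      · rw [if_neg h]
        constructor
        · rintro (hc | hc)
          · exact Or.inl hc
          · rcases hc with ⟨q, hq, h1, h2⟩; exact Or.inr ⟨q, Or.inr hq, h1, h2⟩
        · rintro (hc | ⟨q, hq | hq, h1, h2⟩)
          · exact Or.inl hc
          · exact absurd (hq ▸ h2) h
          · exact Or.inr ⟨q, hq, h1, h2⟩

theorem pvDoubled_mem (l : List Char) (c : Char) :
    c ∈ pvDoubled l ↔ ∃ r ∈ pvRuns l, r.1 = c ∧ 2 ≤ r.2 := by
  unfold pvDoubled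
  rw [pvDoubled_fold_mem]
  simp [PySem.Set.empty]

theorem pvDoubled_fold_nodup (rs : List (Char × Nat)) (s : PySem.Set Char) (hs : s.Nodup) :
    (rs.foldl (fun s r => if 2 ≤ r.2 then PySem.Set.add s r.1 else s) s).Nodup := by
  induction rs generalizing s with
  | nil => exact hs
  | cons r rest ih =>
      simp only [List.foldl_cons]
      by_cases h : 2 ≤ r.2
      · rw [if_pos h]; exact ih _ (PySem.Set.nodup_add s r.1 hs)
      · rw [if_neg h]; exact ih _ hs

theorem pvDoubled_nodup (l : List Char) : (pvDoubled l).Nodup := by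
  exact pvDoubled_fold_nodup _ _ List.nodup_nil

theorem pv_pred_pair (a b : Char) :
    (PySem.List.pyGet? [a, b] 0 == PySem.List.pyGet? [a, b] 1) = (a == b) := by
  simp [PySem.List.pyGet?, PySem.List.pyIdx?]

theorem pv_main (l : List Char) :
    ((PySem.Set.ofList (pvAdjPairs l)).countP
        (fun key => PySem.List.pyGet? key 0 == PySem.List.pyGet? key 1))
      = (pvDoubled l).length := by
  rw [List.countP_eq_length_filter]
  have hperm :
      ((PySem.Set.ofList (pvAdjPairs l)).filter
          (fun key => PySem.List.pyGet? key 0 == PySem.List.pyGet? key 1)).Perm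
        ((pvDoubled l).map (fun c => [c, c])) := by
    rw [List.perm_ext_iff_of_nodup
      ((PySem.Set.nodup_ofList (pvAdjPairs l)).filter _)
      ((pvDoubled_nodup l).map (fun c1 c2 h => by simpa using h))]
    intro x
    rw [List.mem_filter, List.mem_map, PySem.Set.mem_ofList]
    constructor
    · rintro ⟨hx, hpred⟩
      obtain ⟨a, b, rfl⟩ := pvAdjPairs_shape l x hx
      have hab : a = b := by
        rw [pv_pred_pair] at hpred
        exact beq_iff_eq.mp hpred
      subst hab
      exact ⟨a, (pvDoubled_mem l a).mpr ((pvRuns_double l a).mpr hx), rfl⟩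
    · rintro ⟨c, hc, rfl⟩
      refine ⟨(pvRuns_double l c).mp ((pvDoubled_mem l c).mp hc), ?_⟩
      rw [pv_pred_pair]
      exact beq_self_eq_true c
  rw [hperm.length_eq, List.length_map]

-- ===== VERDICT (by name: the statement is the Claim_ definition above) =====
theorem check_multiple_duplicate_pair_spec : Claim_equal_check_multiple_duplicate_pair := by
  intro password _
  unfold Spec_check_multiple_duplicate_pair
  unfold check_multiple_duplicate_pair check_multiple_duplicate_pair_alt
  dsimp only
  set l := password.toList
  set pairs := pvPopLoop (pvBuildPairs l 0) 0 with hpairs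
  have hkeys : (pairs.foldl pvCountStep PySem.Dict.empty).keys = PySem.Set.ofList pairs :=
    pvCount_keys pairs
  rw [hkeys, PySem.List.foldl_count_if]
  have hmemeq : ∀ x, x ∈ PySem.Set.ofList pairs ↔ x ∈ PySem.Set.ofList (pvAdjPairs l) := by
    intro x
    rw [PySem.Set.mem_ofList, PySem.Set.mem_ofList, hpairs, pvPopLoop_mem,
      pvBuildPairs_eq, List.drop_zero]
  have hcnt :
      (PySem.Set.ofList pairs).countP
          (fun key => PySem.List.pyGet? key 0 == PySem.List.pyGet? key 1)
        = (pvDoubled l).length := by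
    rw [← pv_main l]
    exact List.Perm.countP_eq _
      ((List.perm_ext_iff_of_nodup (PySem.Set.nodup_ofList _)
        (PySem.Set.nodup_ofList _)).mpr hmemeq)
  rw [hcnt]
  show (if (0 : Int) + ((pvDoubled l).length : Int) > 1 then true else false)
      = decide (PySem.Set.len (pvDoubled l) > 1)
  rw [show PySem.Set.len (pvDoubled l) = ((pvDoubled l).length : Int) from rfl]
  by_cases h : ((pvDoubled l).length : Int) > 1
  · simp [h]
  · simp [h]
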